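-- pv_equiv track=rewrite | github.com/sin-zemi/OTSML | 2-13.py | dl1
-- ===== SOURCE A (Python) =====
-- def dl1(dictx, dicty): # L1距離
--     sq = 0
--     for key in set(dictx.keys()) | set(dicty.keys()):
--         x, y = 0, 0
--         if key in dictx:
--             x = dictx[key]
--         if key in dicty:
--             y = dicty[key]
--         sq += abs(x - y)
--     return sq
-- ===== SOURCE B (Python) =====
-- def dl1(dictx, dicty):  # L1 distance via key-set partition: shared keys, x-only, y-only
--     total = sum(abs(dictx[k] - dicty[k]) for k in dictx.keys() & dicty.keys())
--     total += sum(abs(v) for k, v in dictx.items() if k not in dicty)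
--     total += sum(abs(v) for k, v in dicty.items() if k not in dictx)
--     return total
-- ===== Notes on version B (the rewrite author's own statement) =====
-- stated objective: alternative
-- what changed: Replaces A's single pass over the key union with guarded lookups by three disjoint passes (shared keys summing |x-y|, then the x-only and y-only items summing |v|), using that a missing key acts as 0.
import Mathlib
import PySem

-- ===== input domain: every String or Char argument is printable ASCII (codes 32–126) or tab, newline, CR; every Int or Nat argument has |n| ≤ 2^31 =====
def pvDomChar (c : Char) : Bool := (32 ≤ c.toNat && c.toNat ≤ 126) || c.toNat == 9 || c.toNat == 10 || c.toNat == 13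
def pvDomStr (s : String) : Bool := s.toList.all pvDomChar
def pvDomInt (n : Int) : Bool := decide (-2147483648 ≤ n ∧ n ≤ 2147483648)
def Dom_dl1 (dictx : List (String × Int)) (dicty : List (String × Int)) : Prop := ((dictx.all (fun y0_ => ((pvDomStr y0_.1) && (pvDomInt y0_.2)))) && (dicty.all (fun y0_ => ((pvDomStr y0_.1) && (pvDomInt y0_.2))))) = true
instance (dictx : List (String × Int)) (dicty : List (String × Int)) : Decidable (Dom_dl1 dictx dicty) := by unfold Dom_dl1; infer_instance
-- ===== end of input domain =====

-- B computes the same L1 distance by three disjoint passes (shared keys, x-only items, y-only items) instead of one pass over the key union with guarded lookups; same cost, alternative decomposition.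

-- ===== PORT A =====
def dl1 (dictx : List (String × Int)) (dicty : List (String × Int)) : Int :=
  let dx := PySem.Dict.ofList dictx
  let dy := PySem.Dict.ofList dicty
  let ks := PySem.Set.union (PySem.Set.ofList dx.keys) (PySem.Set.ofList dy.keys)
  ks.foldl (fun sq key =>
    let x : Int := if dx.contains key then dx.getD key 0 else 0
    let y : Int := if dy.contains key then dy.getD key 0 else 0
    sq + |x - y|) 0

-- ===== PORT B =====
def dl1_alt (dictx : List (String × Int)) (dicty : List (String × Int)) : Int :=
  let dx := PySem.Dict.ofList dictx
  let dy := PySem.Dict.ofList dicty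
  let both := PySem.Set.inter (PySem.Set.ofList dx.keys) dy.keys
  (both.map (fun k => |dx.getD k 0 - dy.getD k 0|)).sum
    + ((dx.items.filter (fun p => !(dy.contains p.1))).map (fun p => |p.2|)).sum
    + ((dy.items.filter (fun p => !(dx.contains p.1))).map (fun p => |p.2|)).sum


-- ===== PRECONDITION & SPEC =====
def Spec_dl1 (dictx : List (String × Int)) (dicty : List (String × Int)) (out : Int) : Prop := out = dl1_alt dictx dicty
instance (dictx : List (String × Int)) (dicty : List (String × Int)) (out : Int) : Decidable (Spec_dl1 dictx dicty out) := by unfold Spec_dl1; infer_instance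

-- ===== CLAIM (what is proved, stated in full; the proofs are below) =====
def Claim_equal_dl1 : Prop := ∀ (dictx : List (String × Int)) (dicty : List (String × Int)), Dom_dl1 dictx dicty → Spec_dl1 dictx dicty (dl1 dictx dicty)

-- ===== LEMMAS AND PROOFS =====
lemma dict_contains_eq (d : PySem.Dict String Int) (k : String) :
    d.contains k = d.keys.contains k := by
  simp [PySem.Dict.contains, PySem.Dict.keys, List.contains_eq_mem, List.any_eq,
    beq_iff_eq]

lemma sum_map_filter_split (l : List String) (p : String → Bool) (f : String → Int) :
    (l.map f).sum = ((l.filter p).map f).sum + ((l.filter (fun k => !(p k))).map f).sum := by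
  induction l with
  | nil => simp
  | cons a l ih => by_cases h : p a <;> simp [h, ih] <;> ring

lemma items_pass (d : PySem.Dict String Int) (q : String → Bool) (hn : d.keys.Nodup) :
    ((d.keys.filter q).map (fun k => |d.getD k 0|)).sum
      = ((d.items.filter (fun p => q p.1)).map (fun p => |p.2|)).sum := by
  have hk : d.keys = d.items.map Prod.fst := rfl
  rw [hk, List.filter_map, List.map_map]
  congr 1
  apply List.map_congr_left
  intro p hp
  have hpi : p ∈ d.items := List.mem_of_mem_filter hp
  have := PySem.Dict.getD_of_mem_items (d := d) (k := p.1) (v := p.2) (d0 := (0:Int)) (by simpa using hpi) hn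
  simp [Function.comp, this]


-- ===== VERDICT (by name: the statement is the Claim_ definition above) =====
theorem dl1_spec : Claim_equal_dl1 := by
  intro dictx dicty _
  unfold Spec_dl1
  unfold dl1 dl1_alt
  set dx := PySem.Dict.ofList dictx
  set dy := PySem.Dict.ofList dicty
  have hnx : dx.keys.Nodup := PySem.Dict.nodup_keys_ofList dictx
  have hny : dy.keys.Nodup := PySem.Dict.nodup_keys_ofList dicty
  have hox : PySem.Set.ofList dx.keys = dx.keys := PySem.Set.ofList_eq_self_of_nodup _ hnx
  have hoy : PySem.Set.ofList dy.keys = dy.keys := PySem.Set.ofList_eq_self_of_nodup _ hny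
  simp only [hox, hoy]
  rw [PySem.List.foldl_add _ (fun key =>
    |(if dx.contains key then dx.getD key 0 else 0) - (if dy.contains key then dy.getD key 0 else 0)|)]
  rw [show PySem.Set.union dx.keys dy.keys = dx.keys ++ (dy.keys.filter (fun y => !(dx.keys.contains y))) by
        rw [PySem.Set.union]
        rw [PySem.Set.update_eq_append_filter]
        rw [PySem.Set.ofList_eq_self_of_nodup _ hny]
        simp]
  rw [List.map_append, List.sum_append, zero_add]
  rw [sum_map_filter_split dx.keys (fun k => dy.contains k)]
  congr 1
  · congr 1
    · -- intersection part
      rw [PySem.Set.inter]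
      rw [show List.filter (fun x => PySem.Set.contains dy.keys x) dx.keys
            = List.filter (fun k => dy.contains k) dx.keys from
          List.filter_congr (fun k _ => by simp [dict_contains_eq])]
      refine congrArg List.sum (List.map_congr_left ?_)
      intro k hk
      have hk1 : k ∈ dx.keys := List.mem_of_mem_filter hk
      have hk2 : dy.contains k = true := List.of_mem_filter hk
      have hx : dx.contains k = true := (PySem.Dict.contains_iff_mem_keys _ _).2 hk1
      simp [hx, hk2]
    · -- x-only part
      rw [← items_pass dx (fun k => !(dy.contains k)) hnx]
      refine congrArg List.sum (List.map_congr_left ?_)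
      intro k hk
      have hk1 : k ∈ dx.keys := List.mem_of_mem_filter hk
      have hk2 := (List.mem_filter.1 hk).2
      have hx : dx.contains k = true := (PySem.Dict.contains_iff_mem_keys _ _).2 hk1
      simp at hk2
      simp [hx, hk2]
  · -- y-only part
    rw [show List.filter (fun y => !(dx.keys.contains y)) dy.keys
          = List.filter (fun k => !(dx.contains k)) dy.keys from
        List.filter_congr (fun k _ => by simp [dict_contains_eq])]
    rw [← items_pass dy (fun k => !(dx.contains k)) hny]
    refine congrArg List.sum (List.map_congr_left ?_)
    intro k hk
    have hk1 : k ∈ dy.keys := List.mem_of_mem_filter hk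
    have hk2 := (List.mem_filter.1 hk).2
    have hy : dy.contains k = true := (PySem.Dict.contains_iff_mem_keys _ _).2 hk1
    simp at hk2
    simp [hy, hk2]
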